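-- pv_equiv track=rewrite | github.com/Kudito98/Codesignal-tasks | code-arcade/79-threeSplit/threeSplit.py | solution
-- ===== SOURCE A (Python) =====
-- def solution(a):
--     tot = sum(a) // 3
--     ans = 0
--     cur = 0
--     first = 0
--
--     for i in range(len(a) - 1):
--         cur += a[i]
--         if cur == tot:
--             first += 1
--         if cur == 2 * tot:
--             ans += first
--             if tot == 0:
--                 ans -= 1
--
--     return ans
-- ===== SOURCE B (Python) =====
-- def solution(a):
--     tot = sum(a) // 3
--     # prefix sums over all but the last element
--     pre = []
--     s = 0
--     for x in a[:-1]: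
--         s += x
--         pre.append(s)
--     # after[i] = number of positions j > i with pre[j] == 2*tot
--     after_rev = []
--     c = 0
--     for p in reversed(pre):
--         after_rev.append(c)
--         if p == 2 * tot:
--             c += 1
--     after = after_rev[::-1]
--     # each first cut i (pre[i] == tot) pairs with every later second cut
--     return sum(af for p, af in zip(pre, after) if p == tot)
-- ===== Notes on version B (the rewrite author's own statement) =====
-- stated objective: alternative
-- what changed: Replaces A's single fused left-to-right loop (running cur/first/ans with a tot==0 correction) by an explicit prefix-sum list, a right-to-left suffix-count table after[i] = #{j>i : prefix[j]==2*tot}, and a final sum of after[i] over first-cut positions prefix[i]==tot.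
import Mathlib
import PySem

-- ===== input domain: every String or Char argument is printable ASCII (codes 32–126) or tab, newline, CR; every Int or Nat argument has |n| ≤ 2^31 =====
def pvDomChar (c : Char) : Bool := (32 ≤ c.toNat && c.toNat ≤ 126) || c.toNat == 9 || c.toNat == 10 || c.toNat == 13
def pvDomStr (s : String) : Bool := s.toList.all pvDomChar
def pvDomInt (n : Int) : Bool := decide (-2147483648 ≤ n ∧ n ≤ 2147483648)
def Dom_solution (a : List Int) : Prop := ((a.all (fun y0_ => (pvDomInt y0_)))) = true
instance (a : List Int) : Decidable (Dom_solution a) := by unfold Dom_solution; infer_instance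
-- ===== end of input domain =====

-- B replaces A's single fused left-to-right loop by an explicit prefix-sum list,
-- a right-to-left suffix-count table and a final pair-count sum (alternative decomposition, same cost).


-- ===== PORT A =====
def solution (a : List Int) : Int :=
  let tot := PySem.Int.floordiv (a.foldl (· + ·) 0) 3
  let st := (PySem.List.pyRange 0 ((a.length : Int) - 1) 1).foldl
    (fun (st : Int × Int × Int) i =>
      let cur := st.2.1 + PySem.List.pyGetD a i 0
      let first := if cur = tot then st.2.2 + 1 else st.2.2
      let ans := if cur = 2 * tot then
          (if tot = 0 then st.1 + first - 1 else st.1 + first)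
        else st.1
      (ans, cur, first)) (0, 0, 0)
  st.1

-- ===== PORT B =====
def solution_alt (a : List Int) : Int :=
  let tot := PySem.Int.floordiv (a.foldl (· + ·) 0) 3
  -- prefix sums over a[:-1]
  let pre := ((PySem.List.slice a none (some (-1))).foldl
    (fun (st : List Int × Int) x => (st.1 ++ [st.2 + x], st.2 + x)) ([], 0)).1
  -- reversed(pre) loop building after_rev, counting prefixes equal to 2*tot
  let ar := pre.reverse.foldl
    (fun (st : List Int × Int) p =>
      (st.1 ++ [st.2], if p = 2 * tot then st.2 + 1 else st.2)) ([], 0)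
  let after := ar.1.reverse   -- after_rev[::-1]
  (pre.zip after).foldl (fun s pa => if pa.1 = tot then s + pa.2 else s) 0

-- ===== PRECONDITION & SPEC =====
def Spec_solution (a : List Int) (out : Int) : Prop := out = solution_alt a
instance (a : List Int) (out : Int) : Decidable (Spec_solution a out) := by unfold Spec_solution; infer_instance

-- ===== CLAIM (what is proved, stated in full; the proofs are below) =====
def Claim_equal_solution : Prop := ∀ (a : List Int), Dom_solution a → Spec_solution a (solution a)

-- ===== LEMMAS AND PROOFS =====

-- prefix sums of L starting from running total c
def pvPres (c : Int) : List Int → List Int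
  | [] => []
  | x :: L => (c + x) :: pvPres (c + x) L

-- number of elements of M equal to 2*t
def pvCnt2 (t : Int) : List Int → Int
  | [] => 0
  | x :: M => (if x = 2 * t then 1 else 0) + pvCnt2 t M

-- suffix-count table: entry i = pvCnt2 of the part strictly after i
def pvAft (t : Int) : List Int → List Int
  | [] => []
  | _ :: M => pvCnt2 t M :: pvAft t M

-- the pair count B computes
def pvFB (t : Int) : List Int → Int
  | [] => 0
  | x :: M => (if x = t then pvCnt2 t M else 0) + pvFB t M

-- A's loop over the prefix-sum list equals B's pair count (with the running `first` as parameter)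
theorem pv_presA (t : Int) : ∀ (L : List Int) (ans c f : Int),
    (L.foldl (fun (st : Int × Int × Int) x =>
      let cur := st.2.1 + x
      let first := if cur = t then st.2.2 + 1 else st.2.2
      let ans := if cur = 2 * t then
          (if t = 0 then st.1 + first - 1 else st.1 + first)
        else st.1
      (ans, cur, first)) (ans, c, f)).1
    = ans + pvFB t (pvPres c L) + f * pvCnt2 t (pvPres c L) := by
  intro L
  induction L with
  | nil => intro ans c f; simp [pvPres, pvFB, pvCnt2]
  | cons x L ih =>
      intro ans c f
      simp only [List.foldl_cons, pvPres, pvFB, pvCnt2, ih]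
      split_ifs <;> ring_nf <;> omega

-- B's prefix-building loop produces pvPres
theorem pv_preB : ∀ (L : List Int) (pr : List Int) (c : Int),
    (L.foldl (fun (st : List Int × Int) x => (st.1 ++ [st.2 + x], st.2 + x)) (pr, c)).1
    = pr ++ pvPres c L := by
  intro L
  induction L with
  | nil => intro pr c; simp [pvPres]
  | cons x L ih => intro pr c; simp [pvPres, List.foldl_cons, ih]

-- B's reversed loop produces the reversed suffix-count table and the total 2*tot count
theorem pv_afterB (t : Int) : ∀ (M : List Int),
    M.reverse.foldl
      (fun (st : List Int × Int) p =>
        (st.1 ++ [st.2], if p = 2 * t then st.2 + 1 else st.2)) ([], 0)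
    = ((pvAft t M).reverse, pvCnt2 t M) := by
  intro M
  induction M with
  | nil => simp [pvAft, pvCnt2]
  | cons x M ih =>
      simp only [List.reverse_cons, List.foldl_append, ih, List.foldl_cons, List.foldl_nil,
        pvAft, pvCnt2]
      split <;> (simp; try ring)

-- B's final sum over zip pre after equals pvFB
theorem pv_sumB (t : Int) : ∀ (M : List Int) (s : Int),
    (M.zip (pvAft t M)).foldl (fun s pa => if pa.1 = t then s + pa.2 else s) s
    = s + pvFB t M := by
  intro M
  induction M with
  | nil => intro s; simp [pvAft, pvFB]
  | cons x M ih =>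
      intro s
      simp only [pvAft, pvFB, List.zip_cons_cons, List.foldl_cons, ih]
      split <;> ring

-- A's index loop over range(len(a)-1) is a fold over a.dropLast
theorem pv_bridgeA {S : Type} (a : List Int) (h : a ≠ [])
    (f : S → Int → S) (init : S) :
    (PySem.List.pyRange 0 ((a.length : Int) - 1) 1).foldl
      (fun st i => f st (PySem.List.pyGetD a i 0)) init
    = a.dropLast.foldl f init := by
  have hpos : 1 ≤ a.length := List.length_pos_iff.mpr h
  have hlen : ((a.length : Int) - 1) = (a.dropLast.length : Int) := by
    simp [List.length_dropLast]; omega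
  rw [hlen]
  rw [PySem.List.foldl_congr_mem (g := fun st i => f st (PySem.List.pyGetD a.dropLast i 0))]
  · exact PySem.List.foldl_pyRange_zero_pyGetD' a.dropLast 0 f init
  · intro acc x hx
    rw [PySem.List.mem_pyRange_one] at hx
    have hx2 : x < (a.dropLast.length : Int) := hx.2
    have hxn : x.toNat < a.dropLast.length := by omega
    congr 1
    rw [PySem.List.pyGetD_eq_getElem (h0 := hx.1)
          (h1 := by simp [List.length_dropLast] at hxn ⊢; omega),
        PySem.List.pyGetD_eq_getElem (h0 := hx.1) (h1 := by exact_mod_cast hx2)]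
    rw [List.getElem_dropLast]

-- ===== VERDICT (by name: the statement is the Claim_ definition above) =====
theorem solution_spec : Claim_equal_solution := by
  intro a _
  unfold Spec_solution solution solution_alt
  rcases eq_or_ne a [] with rfl | h
  · rfl
  · simp only []
    set t := PySem.Int.floordiv (a.foldl (· + ·) 0) 3 with ht
    rw [pv_bridgeA a h
      (fun (st : Int × Int × Int) x =>
        let cur := st.2.1 + x
        let first := if cur = t then st.2.2 + 1 else st.2.2
        let ans := if cur = 2 * t then
            (if t = 0 then st.1 + first - 1 else st.1 + first)
          else st.1
        (ans, cur, first)) (0, 0, 0)]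
    rw [pv_presA t a.dropLast 0 0 0]
    rw [PySem.List.slice_to_neg_one]
    rw [pv_preB a.dropLast [] 0]
    simp only [List.nil_append]
    rw [pv_afterB t (pvPres 0 a.dropLast)]
    simp only [List.reverse_reverse]
    rw [pv_sumB t (pvPres 0 a.dropLast) 0]
    ring
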